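-- pv_equiv track=rewrite | github.com/arturyepez10/scripts-thesis | iemocap/format.py | convert_row
-- ===== SOURCE A (Python) =====
-- CLASSIFIER_LABELS = ["joy", "sadness", "trust", "disgust", "fear", "anger", "surprise", "anticipation"]
--
-- def convert_row(row: list[1 | 0]) -> list[1 | 0]:
--   new_row = [0 for _ in range(0, len(CLASSIFIER_LABELS))]
--
--   # We assign it according to the end result assignments we set up as end result
--   assignment_index = []
--
--   for element in row:
--     # Manually go through the labels and parse them to the new emotions/labels
--     # while ignoring the 'neutral state' and 'other' emotions
--     if element == "Happiness":
--       assignment_index.append(0)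
--       assignment_index.append(2)
--     elif element == "Anger":
--       assignment_index.append(5)
--     elif element == "Sadness":
--       assignment_index.append(1)
--     elif element == "Frustration":
--       assignment_index.append(5)
--       assignment_index.append(1)
--     elif element == "Excited":
--       assignment_index.append(0)
--       assignment_index.append(7)
--     elif element == "Fear":
--       assignment_index.append(4)
--     elif element == "Surprise":
--       assignment_index.append(6)
--
--   # We assign the new indexes to the new resulting row
--   for new_index in assignment_index:
--     new_row[new_index] = 1
--
--   return new_row
-- ===== SOURCE B (Python) =====
-- CLASSIFIER_LABELS = ["joy", "sadness", "trust", "disgust", "fear", "anger", "surprise", "anticipation"]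
--
-- # Transposed "gather" formulation: for each output emotion, the set of input
-- # labels that trigger it (inverse of A's per-label scatter of indices).
-- TRIGGERS = [
--     ("Happiness", "Excited"),      # joy
--     ("Sadness", "Frustration"),    # sadness
--     ("Happiness",),                # trust
--     (),                            # disgust
--     ("Fear",),                     # fear
--     ("Anger", "Frustration"),      # anger
--     ("Surprise",),                 # surprise
--     ("Excited",),                  # anticipation
-- ]
--
-- def convert_row(row):
--   present = set(row)
--   return [1 if any(lbl in present for lbl in t) else 0 for t in TRIGGERS]
-- ===== Notes on version B (the rewrite author's own statement) =====
-- stated objective: alternative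
-- what changed: Transposes the computation: instead of scattering indices per input label (if/elif chain building an intermediate assignment_index list then a second assignment loop), B builds the set of labels present once and computes each of the 8 output positions independently as a membership test against that position's trigger-label list (a gather over outputs).
import Mathlib
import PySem

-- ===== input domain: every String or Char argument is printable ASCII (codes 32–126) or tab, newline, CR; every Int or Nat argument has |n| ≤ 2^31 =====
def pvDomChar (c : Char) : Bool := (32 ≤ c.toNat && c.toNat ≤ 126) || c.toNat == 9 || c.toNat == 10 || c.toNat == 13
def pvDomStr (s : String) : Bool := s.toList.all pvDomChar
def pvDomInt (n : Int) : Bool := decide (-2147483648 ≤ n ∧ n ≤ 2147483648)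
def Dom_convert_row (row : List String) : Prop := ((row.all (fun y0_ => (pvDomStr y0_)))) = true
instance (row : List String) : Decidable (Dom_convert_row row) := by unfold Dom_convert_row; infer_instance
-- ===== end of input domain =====

-- B transposes A's per-label index scatter into a per-output gather: it builds the set of
-- labels present once and computes each of the 8 positions as a membership test; same value.

-- ===== PORT A =====
def CLASSIFIER_LABELS : List String :=
  ["joy", "sadness", "trust", "disgust", "fear", "anger", "surprise", "anticipation"]

def convert_row (row : List String) : List Int :=
  let new_row : List Int := (List.range CLASSIFIER_LABELS.length).map (fun _ => 0)
  let assignment_index : List Nat :=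
    row.foldl (fun acc element =>
      if element == "Happiness" then (acc ++ [0]) ++ [2]
      else if element == "Anger" then acc ++ [5]
      else if element == "Sadness" then acc ++ [1]
      else if element == "Frustration" then (acc ++ [5]) ++ [1]
      else if element == "Excited" then (acc ++ [0]) ++ [7]
      else if element == "Fear" then acc ++ [4]
      else if element == "Surprise" then acc ++ [6]
      else acc) []
  assignment_index.foldl (fun r i => r.set i 1) new_row

-- ===== PORT B =====
-- per-output trigger-label lists (tuples in Source B)
def TRIGGERS : List (List String) :=
  [["Happiness", "Excited"], ["Sadness", "Frustration"], ["Happiness"], [],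
   ["Fear"], ["Anger", "Frustration"], ["Surprise"], ["Excited"]]

def convert_row_alt (row : List String) : List Int :=
  let present : PySem.Set String := PySem.Set.ofList row
  TRIGGERS.map (fun t => if t.any (fun lbl => PySem.Set.contains present lbl) then 1 else 0)

-- ===== PRECONDITION & SPEC =====
def Spec_convert_row (row : List String) (out : List Int) : Prop := out = convert_row_alt row
instance (row : List String) (out : List Int) : Decidable (Spec_convert_row row out) := by unfold Spec_convert_row; infer_instance

-- ===== CLAIM (what is proved, stated in full; the proofs are below) =====
def Claim_equal_convert_row : Prop := ∀ (row : List String), Dom_convert_row row → Spec_convert_row row (convert_row row)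

-- ===== LEMMAS AND PROOFS =====

/-- The per-label index list A scatters for one row element. -/
def pvIdx (element : String) : List Nat :=
  if element == "Happiness" then [0, 2]
  else if element == "Anger" then [5]
  else if element == "Sadness" then [1]
  else if element == "Frustration" then [5, 1]
  else if element == "Excited" then [0, 7]
  else if element == "Fear" then [4]
  else if element == "Surprise" then [6]
  else []

lemma pvA_fold_eq (row : List String) (acc : List Nat) :
    row.foldl (fun acc element =>
      if element == "Happiness" then (acc ++ [0]) ++ [2]
      else if element == "Anger" then acc ++ [5]
      else if element == "Sadness" then acc ++ [1]
      else if element == "Frustration" then (acc ++ [5]) ++ [1]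
      else if element == "Excited" then (acc ++ [0]) ++ [7]
      else if element == "Fear" then acc ++ [4]
      else if element == "Surprise" then acc ++ [6]
      else acc) acc
    = acc ++ row.flatMap pvIdx := by
  induction row generalizing acc with
  | nil => simp
  | cons e rest ih =>
    simp only [List.foldl_cons, List.flatMap_cons]
    rw [ih]
    unfold pvIdx
    split_ifs <;> simp

lemma pv_len_scatter (L : List Nat) (init : List Int) :
    (L.foldl (fun r i => r.set i 1) init).length = init.length := by
  induction L generalizing init with
  | nil => rfl
  | cons i L ih => simp [List.foldl_cons, ih]

lemma pv_getElem_scatter (L : List Nat) (init : List Int) (j : Nat) (hj : j < init.length) :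
    (L.foldl (fun r i => r.set i 1) init)[j]'(by rw [pv_len_scatter]; exact hj)
      = if j ∈ L then 1 else init[j] := by
  induction L generalizing init with
  | nil => simp
  | cons i L ih =>
    simp only [List.foldl_cons]
    rw [ih (init.set i 1) (by simpa using hj)]
    by_cases hL : j ∈ L
    · simp [hL]
    · by_cases hij : i = j
      · subst hij; simp [hL]
      · simp [hL, hij, Ne.symm hij]

/-- For any label and any output position, A's scatter hits the position
    exactly when the label is in B's trigger list for that position. -/
lemma pv_hit (e : String) (j : Nat) (hj : j < TRIGGERS.length) :
    j ∈ pvIdx e ↔ e ∈ TRIGGERS[j]'hj := by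
  have hj8 : j < 8 := by simpa [TRIGGERS] using hj
  unfold pvIdx TRIGGERS
  split_ifs with h1 h2 h3 h4 h5 h6 h7 <;>
    simp only [beq_iff_eq] at * <;>
    (try subst h1) <;> (try subst h2) <;> (try subst h3) <;> (try subst h4) <;>
    (try subst h5) <;> (try subst h6) <;> (try subst h7) <;>
    interval_cases j <;> simp_all

-- ===== VERDICT (by name: the statement is the Claim_ definition above) =====
theorem convert_row_spec : Claim_equal_convert_row := by
  intro row _
  simp only [Spec_convert_row, convert_row, convert_row_alt]
  rw [pvA_fold_eq, List.nil_append]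
  apply List.ext_getElem
  · simp [pv_len_scatter, CLASSIFIER_LABELS, TRIGGERS]
  · intro j hj hj'
    have hjT : j < TRIGGERS.length := by simpa using hj'
    have hjI : j < ((List.range CLASSIFIER_LABELS.length).map (fun _ => (0 : Int))).length := by
      simp [CLASSIFIER_LABELS, TRIGGERS] at hjT ⊢; omega
    have key : (j ∈ List.flatMap pvIdx row) ↔
        ((TRIGGERS[j]'hjT).any (fun lbl => (PySem.Set.ofList row).contains lbl) = true) := by
      rw [List.mem_flatMap, List.any_eq_true]
      constructor
      · rintro ⟨e, he, hje⟩
        exact ⟨e, (pv_hit e j hjT).mp hje, by simp [PySem.Set.contains, PySem.Set.mem_ofList, he]⟩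
      · rintro ⟨lbl, hl, hc⟩
        exact ⟨lbl, by simpa [PySem.Set.contains, PySem.Set.mem_ofList] using hc,
          (pv_hit lbl j hjT).mpr hl⟩
    rw [pv_getElem_scatter _ _ j hjI]
    simp only [List.getElem_map]
    simp only [key]
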